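-- pv_equiv track=rewrite | github.com/lgp171188/launchpad | lib/lp/services/utils.py | iter_split
-- ===== SOURCE A (Python) =====
-- def iter_split(string, splitter, splits=None):
--     """Iterate over ways to split 'string' in two with 'splitter'.
--
--     If 'string' is empty, then yield nothing. Otherwise, yield tuples like
--     ('a/b/c', ''), ('a/b', '/c'), ('a', '/b/c') for a string 'a/b/c' and a
--     splitter '/'.
--
--     The tuples are yielded such that the first result has everything in the
--     first tuple. With each iteration, the first element gets smaller and the
--     second gets larger. It stops iterating just before it would have to yield
--     ('', 'a/b/c').
--
--     Splits, if specified, is an iterable of splitters to split the string at.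
--     """
--     if string == "":
--         return
--     tokens = string.split(splitter)
--     if splits is None:
--         splits = reversed(range(1, len(tokens) + 1))
--     for i in splits:
--         first = splitter.join(tokens[:i])
--         yield first, string[len(first) :]
-- ===== SOURCE B (Python) =====
-- def iter_split(string, splitter, splits=None):
--     """Iterate over ways to split 'string' in two with 'splitter'.
--
--     Builds every prefix once in a single incremental pass, maps each
--     1-based split index to its prefix, and answers each requested index
--     by one lookup.
--     """
--     if string == "":
--         return
--     tokens = string.split(splitter)
--     prefix = tokens[0]
--     prefixes = [prefix]
--     for token in tokens[1:]:
--         prefix = prefix + splitter + token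
--         prefixes.append(prefix)
--     prefix_at = dict(enumerate(prefixes, 1))
--     if splits is None:
--         splits = range(len(prefixes), 0, -1)
--     for i in splits:
--         first = prefix_at[i]
--         yield first, string[len(first):]
-- ===== Notes on version B (the rewrite author's own statement) =====
-- stated objective: alternative
-- what changed: Instead of re-joining tokens[:i] with the splitter for every requested index, B builds all prefixes in one incremental pass and a dict from 1-based split index to prefix, answering each index by a single lookup; Pre_ excludes the empty splitter (A raises ValueError) and explicit split indices outside 1..number-of-tokens, where A's list-slice clamping yields accidental values and B's dict lookup raises KeyError.
-- outside the precondition, e.g. on iter_split('a/b', '/', [3]): A returns [('a/b', '')], B raises KeyError; on iter_split('a/b', '/', [0]): A returns [('', 'a/b')], B raises KeyError; on iter_split('a/b/c', '/', [-1]): A returns [('a/b', '/c')], B raises KeyError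
import Mathlib
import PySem

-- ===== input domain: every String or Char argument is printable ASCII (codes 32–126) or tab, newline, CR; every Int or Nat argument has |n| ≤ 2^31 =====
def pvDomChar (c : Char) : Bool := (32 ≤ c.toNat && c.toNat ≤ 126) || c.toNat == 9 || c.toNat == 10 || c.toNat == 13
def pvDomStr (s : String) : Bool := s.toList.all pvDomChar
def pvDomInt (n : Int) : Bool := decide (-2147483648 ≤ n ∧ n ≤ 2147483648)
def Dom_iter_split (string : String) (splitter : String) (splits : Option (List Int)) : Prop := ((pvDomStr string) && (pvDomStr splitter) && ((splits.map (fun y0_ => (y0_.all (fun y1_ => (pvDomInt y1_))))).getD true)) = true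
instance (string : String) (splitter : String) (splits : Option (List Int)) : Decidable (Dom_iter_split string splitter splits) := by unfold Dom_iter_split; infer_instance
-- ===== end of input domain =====

-- B builds every prefix once in a single incremental pass and a dict from 1-based split
-- index to prefix, answering each requested index by one lookup instead of re-joining
-- tokens[:i] for every index; objective: alternative (similar cost, dominated by the
-- yielded strings).

-- ===== PORT A =====
def iter_split (string : String) (splitter : String) (splits : Option (List Int)) : List (String × String) :=
  if string == "" then []
  else
    match PySem.Str.split? string splitter with
    | none => []  -- splitter = "": Python raises ValueError here; excluded by Pre_
    | some tokens =>
      let idxs : List Int :=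
        match splits with
        | none => (PySem.List.pyRange 1 ((tokens.length : Int) + 1) 1).reverse
        | some s => s
      idxs.foldl (fun out i =>
        let first := PySem.Str.join splitter (PySem.List.slice tokens none (some i))
        out ++ [(first, PySem.Str.slice string (some (PySem.Str.len first)) none)]) []

-- ===== PORT B =====
def iter_split_alt (string : String) (splitter : String) (splits : Option (List Int)) : List (String × String) :=
  if string == "" then []
  else
    match PySem.Str.split? string splitter with
    | none => []  -- splitter = "": Python raises ValueError here; excluded by Pre_
    | some tokens =>
      -- prefix = tokens[0]; prefixes = [prefix]; for token in tokens[1:]: prefix += splitter + token; prefixes.append(prefix)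
      let st := (tokens.drop 1).foldl
        (fun (s : String × List String) token =>
          (s.1 ++ splitter ++ token, s.2 ++ [s.1 ++ splitter ++ token]))
        (tokens.headD "", [tokens.headD ""])
      let prefixes := st.2
      let prefixAt : PySem.Dict Int String := PySem.Dict.ofList (PySem.List.enumerate prefixes 1)
      let idxs : List Int :=
        match splits with
        | none => PySem.List.pyRange (prefixes.length : Int) 0 (-1)
        | some s => s
      idxs.foldl (fun out i =>
        let first := (prefixAt.get? i).getD ""  -- prefix_at[i]; a missing key is KeyError, excluded by Pre_
        out ++ [(first, PySem.Str.slice string (some (PySem.Str.len first)) none)]) []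

-- ===== PRECONDITION & SPEC =====
-- Pre_ excludes the inputs where Python A raises ValueError (an empty splitter with a
-- non-empty string; B raises there too) and, when an explicit splits list is given,
-- split indices outside 1..number-of-tokens: there A's list-slice clamping yields
-- accidental values while B's dict lookup raises KeyError.
def Pre_iter_split (string : String) (splitter : String) (splits : Option (List Int)) : Prop :=
  string = "" ∨
    (splitter ≠ "" ∧
      ∀ s, splits = some s → ∀ i ∈ s, 1 ≤ i ∧ i ≤ (PySem.Str.count string splitter : Int) + 1)
instance (string : String) (splitter : String) (splits : Option (List Int)) : Decidable (Pre_iter_split string splitter splits) := by unfold Pre_iter_split; infer_instance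
def pvWitness_iter_split : String × String × Option (List Int) := ("a/b/c", "/", none)

def Spec_iter_split (string : String) (splitter : String) (splits : Option (List Int)) (out : List (String × String)) : Prop := out = iter_split_alt string splitter splits
instance (string : String) (splitter : String) (splits : Option (List Int)) (out : List (String × String)) : Decidable (Spec_iter_split string splitter splits out) := by unfold Spec_iter_split; infer_instance

-- ===== CLAIM (what is proved, stated in full; the proofs are below) =====
def Claim_equal_iter_split : Prop := ∀ (string : String) (splitter : String) (splits : Option (List Int)), Dom_iter_split string splitter splits → Pre_iter_split string splitter splits → Spec_iter_split string splitter splits (iter_split string splitter splits)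

-- ===== LEMMAS AND PROOFS =====

lemma pv_count_go_shift (sep : List Char) (hsep : sep ≠ []) :
    ∀ (f : Nat) (l : List Char) (a : Nat), l.length ≤ f →
      PySem.Chars.count.go sep f l a = a + PySem.Chars.count.go sep l.length l 0 := by
  intro f
  induction f using Nat.strong_induction_on with
  | _ f ih =>
    intro l a h
    match f, l with
    | 0, l =>
      have hl : l = [] := by cases l <;> simp_all
      subst hl; simp [PySem.Chars.count.go]
    | f + 1, [] => simp [PySem.Chars.count.go]
    | f + 1, c :: rest =>
      have hsl : 1 ≤ sep.length := by cases sep <;> simp_all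
      have hd : (List.drop sep.length (c :: rest)).length ≤ rest.length := by
        simp [List.length_drop]; omega
      have h1 : rest.length ≤ f := by simpa using h
      rw [PySem.Chars.count.go.eq_def]
      conv_rhs => rw [show (c :: rest).length = rest.length + 1 from rfl, PySem.Chars.count.go.eq_def]
      simp only []
      split_ifs with hp
      · rw [ih f (by omega) _ _ (le_trans hd h1), ih rest.length (by omega) _ _ hd]
        omega
      · rw [ih f (by omega) _ _ h1, ih rest.length (by omega) _ _ (le_refl _)]

lemma pv_splitOn_go_length (sep : List Char) (hsep : sep ≠ []) :
    ∀ (fuel : Nat) (l cur : List Char) (acc : List (List Char)), l.length < fuel →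
      (PySem.Chars.splitOn.go sep fuel l cur acc).length
        = acc.length + 1 + PySem.Chars.count.go sep l.length l 0 := by
  intro fuel
  induction fuel using Nat.strong_induction_on with
  | _ fuel ih =>
    intro l cur acc h
    match fuel, l with
    | f + 1, [] => simp [PySem.Chars.splitOn.go, PySem.Chars.count.go]
    | f + 1, c :: rest =>
      have hsl : 1 ≤ sep.length := by cases sep <;> simp_all
      have hd : (List.drop sep.length (c :: rest)).length ≤ rest.length := by
        simp [List.length_drop]; omega
      have h1 : rest.length < f := by simp at h; omega
      rw [PySem.Chars.splitOn.go.eq_def]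
      conv_rhs => rw [show (c :: rest).length = rest.length + 1 from rfl, PySem.Chars.count.go.eq_def]
      simp only []
      split_ifs with hp
      · rw [ih f (by omega) _ _ _ (by omega),
          pv_count_go_shift sep hsep rest.length _ 1 hd,
          pv_count_go_shift sep hsep _ _ 0 (le_refl _)]
        simp; omega
      · rw [ih f (by omega) _ _ _ h1,
          pv_count_go_shift sep hsep rest.length _ 0 (le_refl _)]

lemma pv_splitOn_length (s sep : List Char) (hsep : sep ≠ []) :
    (PySem.Chars.splitOn s sep).length = PySem.Chars.count s sep + 1 := by
  rw [PySem.Chars.splitOn, PySem.Chars.count]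
  rw [pv_splitOn_go_length sep hsep _ _ _ _ (by omega)]
  have : sep.isEmpty = false := by cases sep <;> simp_all
  simp [this]; omega


def pvChain (sep : String) : String → List String → List String
  | _, [] => []
  | a, t :: ts => (a ++ sep ++ t) :: pvChain sep (a ++ sep ++ t) ts

lemma pv_foldB_eq (sep : String) :
    ∀ (ts : List String) (a : String) (P : List String),
      ts.foldl (fun (s : String × List String) t => (s.1 ++ sep ++ t, s.2 ++ [s.1 ++ sep ++ t])) (a, P)
        = ((pvChain sep a ts).getLastD a, P ++ pvChain sep a ts)
  | [], a, P => by simp [pvChain]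
  | t :: ts, a, P => by
      simp only [List.foldl_cons, pvChain, List.getLastD_cons]
      rw [pv_foldB_eq sep ts (a ++ sep ++ t) (P ++ [a ++ sep ++ t])]
      simp [List.append_assoc]

lemma pv_chain_length (sep : String) : ∀ (a : String) (ts : List String),
    (pvChain sep a ts).length = ts.length
  | _, [] => rfl
  | a, t :: ts => by simp [pvChain, pv_chain_length sep _ ts]

lemma pv_enum_fst_ge {α : Type} : ∀ (ps : List α) (s j : Int),
    j ∈ (PySem.List.enumerate ps s).map Prod.fst → s ≤ j
  | [], s, j => by simp [PySem.List.enumerate]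
  | p :: ps, s, j => by
      simp only [PySem.List.enumerate, List.map_cons, List.mem_cons]
      rintro (rfl | h)
      · omega
      · have := pv_enum_fst_ge ps (s + 1) j h
        omega

lemma pv_enum_fst_nodup {α : Type} : ∀ (ps : List α) (s : Int),
    ((PySem.List.enumerate ps s).map Prod.fst).Nodup
  | [], s => by simp [PySem.List.enumerate]
  | p :: ps, s => by
      simp only [PySem.List.enumerate, List.map_cons, List.nodup_cons]
      refine ⟨fun h => ?_, pv_enum_fst_nodup ps (s + 1)⟩
      have := pv_enum_fst_ge ps (s + 1) s h
      omega

lemma pv_get_mk_enum {α : Type} [Inhabited α] : ∀ (ps : List α) (s i : Int),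
    s ≤ i → i < s + ps.length →
      (PySem.Dict.mk (PySem.List.enumerate ps s)).get? i = some (ps.getD (i - s).toNat default)
  | [], s, i => by intro h1 h2; simp at h2; omega
  | p :: ps, s, i => by
      intro h1 h2
      simp only [PySem.List.enumerate]
      rw [PySem.Dict.get?_mk_cons]
      by_cases he : s = i
      · subst he; simp
      · have hne : (s == i) = false := by simp [he]
        rw [hne]
        simp only [Bool.false_eq_true, if_false]
        rw [pv_get_mk_enum ps (s + 1) i (by omega) (by simp at h2 ⊢; omega)]
        have : (i - s).toNat = (i - (s + 1)).toNat + 1 := by omega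
        rw [this, List.getD_cons_succ]

lemma pv_get_ofList_enum {α : Type} [Inhabited α] (ps : List α) (i : Int)
    (h1 : 1 ≤ i) (h2 : i ≤ ps.length) :
    (PySem.Dict.ofList (PySem.List.enumerate ps 1)).get? i = some (ps.getD (i - 1).toNat default) := by
  have hfresh : ∀ a ∈ PySem.List.enumerate ps 1, (PySem.Dict.empty : PySem.Dict Int α).contains a.1 = false := by
    intro a _; simp [PySem.Dict.empty, PySem.Dict.contains]
  have hitems := PySem.Dict.items_foldl_insert_fresh (l := PySem.List.enumerate ps 1)
    (k := Prod.fst) (v := Prod.snd) (d := PySem.Dict.empty) hfresh (pv_enum_fst_nodup ps 1)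
  have : PySem.Dict.ofList (PySem.List.enumerate ps 1) = PySem.Dict.mk (PySem.List.enumerate ps 1) := by
    apply PySem.Dict.ext
    rw [PySem.Dict.ofList, PySem.Dict.update]
    simpa using hitems
  rw [this]
  exact pv_get_mk_enum ps 1 i h1 (by omega)

lemma pv_countdown (n : Nat) :
    PySem.List.pyRange (n : Int) 0 (-1) = (PySem.List.pyRange 1 ((n : Int) + 1) 1).reverse := by
  rw [PySem.List.pyRange_neg_one]
  simp only [Int.sub_zero, Int.toNat_natCast]
  induction n with
  | zero => simp [PySem.List.pyRange]
  | succ m ih =>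
      rw [show ((m + 1 : Nat) : Int) + 1 = ((m : Int) + 1) + 1 by push_cast; ring,
        PySem.List.pyRange_one_succ_right (by omega)]
      rw [List.reverse_append]
      simp only [List.reverse_cons, List.reverse_nil, List.nil_append, List.singleton_append]
      rw [← ih]
      rw [List.range_succ_eq_map]
      simp only [List.map_cons, List.map_map]
      refine congrArg₂ _ (by push_cast; ring) ?_
      apply List.map_congr_left; intro k _
      simp only [Function.comp_apply]
      push_cast; ring

lemma pv_join_singleton (sep x : String) : PySem.Str.join sep [x] = x := by
  rw [← String.toList_inj]
  simp [PySem.Str.toList_join, PySem.Chars.join_singleton]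

lemma pv_chars_join_append_singleton (sep x : List Char) :
    ∀ (l : List (List Char)), l ≠ [] →
      PySem.Chars.join sep (l ++ [x]) = PySem.Chars.join sep l ++ sep ++ x
  | [], h => absurd rfl h
  | [p], _ => by
      simp [PySem.Chars.join_cons_cons, PySem.Chars.join_singleton]
  | p :: q :: r, _ => by
      have ih := pv_chars_join_append_singleton sep x (q :: r) (by simp)
      simp only [List.cons_append, PySem.Chars.join_cons_cons]
      simp only [List.cons_append] at ih
      rw [ih]
      simp [List.append_assoc]

lemma pv_join_append_singleton (sep : String) (l : List String) (x : String) (h : l ≠ []) :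
    PySem.Str.join sep (l ++ [x]) = PySem.Str.join sep l ++ sep ++ x := by
  rw [← String.toList_inj]
  simp only [PySem.Str.toList_join, List.map_append, List.map_cons, List.map_nil,
    String.toList_append]
  exact pv_chars_join_append_singleton sep.toList x.toList (l.map String.toList)
    (by simpa using h)

lemma pv_getD_chain (sep : String) :
    ∀ (rest l : List String), l ≠ [] → ∀ (j : Nat), j < rest.length →
      (pvChain sep (PySem.Str.join sep l) rest).getD j ""
        = PySem.Str.join sep (l ++ rest.take (j + 1))
  | [], _, _, j, hj => absurd hj (by simp)
  | t :: rest, l, hl, 0, _ => by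
      simp [pvChain, pv_join_append_singleton sep l t hl]
  | t :: rest, l, hl, j + 1, hj => by
      simp only [pvChain, List.getD_cons_succ]
      rw [← pv_join_append_singleton sep l t hl]
      rw [pv_getD_chain sep rest (l ++ [t]) (by simp) j (by simpa using hj)]
      simp [List.append_assoc]

-- B's prefixes list indexed at j is A's join of the first j+1 tokens
lemma pv_pref_getD (sep : String) (tokens : List String) (j : Nat) (hj : j < tokens.length) :
    (tokens.headD "" :: pvChain sep (tokens.headD "") (tokens.drop 1)).getD j ""
      = PySem.Str.join sep (tokens.take (j + 1)) := by
  cases tokens with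
  | nil => simp at hj
  | cons t0 rest =>
      match j with
      | 0 => simp [pv_join_singleton]
      | k + 1 =>
          simp only [List.getD_cons_succ, List.headD_cons, List.drop_succ_cons, List.drop_zero]
          have hk : k < rest.length := by simpa using hj
          have h := pv_getD_chain sep rest [t0] (by simp) k hk
          rw [pv_join_singleton] at h
          rw [h]
          simp

-- ===== VERDICT (by name: the statement is the Claim_ definition above) =====
theorem iter_split_spec : Claim_equal_iter_split := by
  intro string splitter splits _ hpre
  unfold Spec_iter_split iter_split iter_split_alt
  by_cases hs : string == ""
  · simp [hs]
  · simp only [if_neg hs]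
    have hstr : string ≠ "" := by simpa using hs
    obtain ⟨hsep, hidx⟩ :
        splitter ≠ "" ∧ ∀ s, splits = some s → ∀ i ∈ s,
          1 ≤ i ∧ i ≤ (PySem.Str.count string splitter : Int) + 1 := by
      rcases hpre with h | h
      · exact absurd h hstr
      · exact h
    have hsepl : splitter.toList ≠ [] := fun h => hsep (by
      have := congrArg String.ofList h; simpa using this)
    cases hsplit : PySem.Str.split? string splitter with
    | none =>
        exfalso
        rw [PySem.Str.split?] at hsplit
        rw [PySem.Chars.split?] at hsplit
        simp [List.isEmpty_iff, hsepl] at hsplit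
    | some tokens =>
        -- tokens.length = count + 1
        have htl : tokens.length = PySem.Str.count string splitter + 1 := by
          rw [PySem.Str.split?, PySem.Chars.split?] at hsplit
          rw [if_neg (by simpa [List.isEmpty_iff] using hsepl)] at hsplit
          simp only [Option.map_some, Option.some_inj] at hsplit
          rw [← hsplit, List.length_map, PySem.Str.count]
          exact pv_splitOn_length _ _ hsepl
        have hnpos : 1 ≤ tokens.length := by omega
        have htne : tokens ≠ [] := by cases tokens <;> simp_all
        -- B's prefix loop
        dsimp only
        rw [pv_foldB_eq]
        simp only
        -- prefixes length
        have hpl : ([tokens.headD ""] ++ pvChain splitter (tokens.headD "") (tokens.drop 1)).length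
            = tokens.length := by
          simp [pv_chain_length]; omega
        -- both loops are maps
        rw [PySem.List.foldl_append_singleton_eq_map, PySem.List.foldl_append_singleton_eq_map]
        simp only [List.nil_append]
        -- pointwise agreement on indices in [1, tokens.length]
        have hpoint : ∀ i : Int, 1 ≤ i → i ≤ (tokens.length : Int) →
            ((PySem.Str.join splitter (PySem.List.slice tokens none (some i)) : String),
              PySem.Str.slice string (some (PySem.Str.len (PySem.Str.join splitter (PySem.List.slice tokens none (some i))))) none)
            = ((((PySem.Dict.ofList (PySem.List.enumerate
                  ([tokens.headD ""] ++ pvChain splitter (tokens.headD "") (tokens.drop 1)) 1)).get? i).getD "" : String),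
              PySem.Str.slice string (some (PySem.Str.len (((PySem.Dict.ofList (PySem.List.enumerate
                  ([tokens.headD ""] ++ pvChain splitter (tokens.headD "") (tokens.drop 1)) 1)).get? i).getD ""))) none) := by
          intro i h1 h2
          have hfirst :
              ((PySem.Dict.ofList (PySem.List.enumerate
                  ([tokens.headD ""] ++ pvChain splitter (tokens.headD "") (tokens.drop 1)) 1)).get? i).getD ""
              = PySem.Str.join splitter (PySem.List.slice tokens none (some i)) := by
            rw [pv_get_ofList_enum _ i h1 (by rw [hpl]; exact_mod_cast h2)]
            simp only [Option.getD_some]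
            have hj : (i - 1).toNat < tokens.length := by omega
            have := pv_pref_getD splitter tokens (i - 1).toNat hj
            simp only [List.singleton_append] at this ⊢
            rw [show (default : String) = "" from rfl, this]
            rw [PySem.List.slice_to tokens (b := i) (by omega)]
            rw [show (i - 1).toNat + 1 = i.toNat by omega]
          rw [hfirst]
        cases hsplits : splits with
        | none =>
            simp only
            rw [hpl, pv_countdown]
            apply List.map_congr_left
            intro i hi
            simp only [List.mem_reverse, PySem.List.mem_pyRange_one] at hi
            exact hpoint i hi.1 (by omega)
        | some s =>
            simp only
            apply List.map_congr_left
            intro i hi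
            have := hidx s hsplits i hi
            exact hpoint i this.1 (by omega)
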